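-- pv_equiv track=rewrite | github.com/pulilohith/hash | hashprob2.py | elementoccurktimes
-- ===== SOURCE A (Python) =====
-- def elementoccurktimes(arr,k):
--     mp={}
--     for i in range(len(arr)):
--         if(arr[i] not in mp):
--             mp[arr[i]]=1
--         else:
--             mp[arr[i]]+=1
--     for j in arr:
--         if(mp[j]==k):
--             return j
--     return -1
-- ===== SOURCE B (Python) =====
-- def elementoccurktimes(arr, k):
--     # strip-and-recurse: test the head's count; if it isn't k, drop every copy
--     # of the head (counts of the remaining values are unchanged) and repeat
--     while arr:
--         x = arr[0]
--         if arr.count(x) == k: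
--             return x
--         arr = [y for y in arr if y != x]
--     return -1
-- ===== Notes on version B (the rewrite author's own statement) =====
-- stated objective: alternative
-- what changed: Replaces A's two staged passes (build a frequency dict over all of arr, then rescan arr against it) with a strip-and-recurse loop: test only the current head's count, and if it is not k drop every copy of the head and repeat on the shrunken remainder; no frequency table or second scan over the original list exists.
import Mathlib
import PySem

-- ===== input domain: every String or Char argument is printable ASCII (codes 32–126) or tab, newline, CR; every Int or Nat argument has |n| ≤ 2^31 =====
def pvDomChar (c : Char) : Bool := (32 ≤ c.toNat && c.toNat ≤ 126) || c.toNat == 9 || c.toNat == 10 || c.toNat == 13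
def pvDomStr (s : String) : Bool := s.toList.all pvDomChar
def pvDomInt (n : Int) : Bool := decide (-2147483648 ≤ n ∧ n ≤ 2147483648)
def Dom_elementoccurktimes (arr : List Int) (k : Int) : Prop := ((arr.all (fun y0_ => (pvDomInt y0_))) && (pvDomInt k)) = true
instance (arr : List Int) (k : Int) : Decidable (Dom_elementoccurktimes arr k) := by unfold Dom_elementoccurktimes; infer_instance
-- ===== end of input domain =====

-- B replaces A's frequency dictionary + second scan with a strip-and-recurse loop
-- (one pass counts the head and drops its copies, then repeats); objective: alternative.

-- ===== PORT A =====
-- second loop of A: 'for j in arr: if mp[j]==k: return j' / 'return -1'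
-- mp[j] is ported as getD j 0: every j scanned is an element of arr, so the key is always present (no KeyError).
def pvScanA (mp : PySem.Dict Int Int) (k : Int) : List Int → Int
  | [] => -1
  | j :: t => if mp.getD j 0 == k then j else pvScanA mp k t

def elementoccurktimes (arr : List Int) (k : Int) : Int :=
  let mp := (PySem.List.pyRange 0 (PySem.List.len arr) 1).foldl
    (fun d i =>
      let x := PySem.List.pyGetD arr i 0   -- arr[i]; i is in range
      if d.contains x then d.insert x (d.getD x 0 + 1) else d.insert x 1)
    PySem.Dict.empty
  pvScanA mp k arr

-- ===== PORT B =====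
-- termination helper for the while loop (cited by decreasing_by): stripping the head shrinks the list
lemma pvFilter_head_length (x : Int) (t : List Int) :
    ((x :: t).filter (fun y => !(y == x))).length < (x :: t).length := by
  rw [List.filter_cons]
  simp
  exact List.length_filter_le _ _

-- Source B's while-loop, as recursion on the shrinking list; arr.count(x) is PySem.List.count,
-- the comprehension [y for y in arr if y != x] is the filter
def elementoccurktimes_alt (arr : List Int) (k : Int) : Int :=
  match arr with
  | [] => -1
  | x :: t =>
    if ((PySem.List.count (x :: t) x : Nat) : Int) == k then x
    else elementoccurktimes_alt ((x :: t).filter (fun y => !(y == x))) k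
termination_by arr.length
decreasing_by exact pvFilter_head_length x t

-- ===== PRECONDITION & SPEC =====
def Spec_elementoccurktimes (arr : List Int) (k : Int) (out : Int) : Prop := out = elementoccurktimes_alt arr k
instance (arr : List Int) (k : Int) (out : Int) : Decidable (Spec_elementoccurktimes arr k out) := by unfold Spec_elementoccurktimes; infer_instance

-- ===== CLAIM (what is proved, stated in full; the proofs are below) =====
def Claim_equal_elementoccurktimes : Prop := ∀ (arr : List Int) (k : Int), Dom_elementoccurktimes arr k → Spec_elementoccurktimes arr k (elementoccurktimes arr k)

-- ===== LEMMAS AND PROOFS =====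

-- reference function: first j in rest with (count of j in full) = k, else -1
def pvFirst (full : List Int) (k : Int) : List Int → Int
  | [] => -1
  | j :: t => if ((full.count j : Nat) : Int) == k then j else pvFirst full k t

lemma pvFirst_cons (full : List Int) (k j : Int) (t : List Int) :
    pvFirst full k (j :: t) = if ((full.count j : Nat) : Int) == k then j else pvFirst full k t := rfl

-- A's branching insert is the uniform counting insert
lemma step_eq (d : PySem.Dict Int Int) (x : Int) :
    (if d.contains x then d.insert x (d.getD x 0 + 1) else d.insert x 1)
      = d.insert x (d.getD x 0 + 1) := by
  by_cases h : d.contains x = true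
  · simp [h]
  · have h' : d.contains x = false := by simpa using h
    simp [h', PySem.Dict.getD_of_not_contains d 0 h']

-- A's frequency table looks up to the plain count
lemma mp_getD (arr : List Int) (v : Int) :
    ((PySem.List.pyRange 0 (PySem.List.len arr) 1).foldl
      (fun d i =>
        let x := PySem.List.pyGetD arr i 0
        if d.contains x then d.insert x (d.getD x 0 + 1) else d.insert x 1)
      PySem.Dict.empty).getD v 0 = ((arr.count v : Nat) : Int) := by
  have hmap : (PySem.List.pyRange 0 (PySem.List.len arr) 1).map (fun i => PySem.List.pyGetD arr i 0) = arr :=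
    PySem.List.map_pyGetD_pyRange_zero arr 0
  calc ((PySem.List.pyRange 0 (PySem.List.len arr) 1).foldl
      (fun d i =>
        let x := PySem.List.pyGetD arr i 0
        if d.contains x then d.insert x (d.getD x 0 + 1) else d.insert x 1)
      PySem.Dict.empty).getD v 0
      = (((PySem.List.pyRange 0 (PySem.List.len arr) 1).map (fun i => PySem.List.pyGetD arr i 0)).foldl
          (fun d x => d.insert x (d.getD x 0 + 1)) (PySem.Dict.empty : PySem.Dict Int Int)).getD v 0 := by
        rw [List.foldl_map]
        simp only [step_eq]
    _ = (arr.foldl (fun d x => d.insert x (d.getD x 0 + 1)) (PySem.Dict.empty : PySem.Dict Int Int)).getD v 0 := by rw [hmap]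
    _ = ((arr.count v : Nat) : Int) := by
        rw [PySem.Dict.getD_foldl_insert_add_one]
        simp [PySem.Dict.getD_empty]

lemma scanA_eq_pvFirst (arr : List Int) (k : Int) (mp : PySem.Dict Int Int)
    (h : ∀ v, mp.getD v 0 = ((arr.count v : Nat) : Int)) :
    ∀ rest, pvScanA mp k rest = pvFirst arr k rest := by
  intro rest
  induction rest with
  | nil => rfl
  | cons j t ih => simp [pvScanA, pvFirst_cons, h j, ih]

-- A equals the reference function
lemma A_eq_pvFirst (arr : List Int) (k : Int) :
    elementoccurktimes arr k = pvFirst arr k arr := by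
  unfold elementoccurktimes
  exact scanA_eq_pvFirst arr k _ (fun v => mp_getD arr v) arr

-- dropping all copies of x (when its count is not k) does not change pvFirst
lemma pvFirst_strip (x : Int) (t : List Int) (k : Int)
    (hx : (((x :: t).count x : Nat) : Int) ≠ k) :
    ∀ rest, pvFirst (x :: t) k rest
      = pvFirst (t.filter (fun y => !(y == x))) k (rest.filter (fun y => !(y == x))) := by
  intro rest
  induction rest with
  | nil => rfl
  | cons j r ih =>
    by_cases h : j = x
    · have hb : (j == x) = true := by simp [h]
      have hk : ((((x :: t).count j : Nat) : Int) == k) = false := by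
        subst h; simpa using hx
      rw [List.filter_cons]
      simp only [hb, Bool.not_true]
      rw [if_neg (by simp), pvFirst_cons, hk]
      simp only [Bool.false_eq_true, if_false]
      exact ih
    · have hb : (j == x) = false := by simp [h]
      have hc : (t.filter (fun y => !(y == x))).count j = (x :: t).count j := by
        rw [List.count_filter (by simp [hb])]
        rw [List.count_cons]
        simp [Ne.symm h]
      rw [List.filter_cons]
      simp only [hb, Bool.not_false]
      rw [if_pos trivial, pvFirst_cons, pvFirst_cons, hc]
      by_cases hk : ((((x :: t).count j : Nat) : Int) == k) = true
      · rw [hk]; simp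
      · rw [eq_false_of_ne_true hk]
        simp only [Bool.false_eq_true, if_false]
        exact ih

-- B equals the reference function (strong induction on the list length)
lemma B_eq_aux (k : Int) : ∀ (n : Nat) (arr : List Int), arr.length ≤ n →
    elementoccurktimes_alt arr k = pvFirst arr k arr := by
  intro n
  induction n with
  | zero =>
    intro arr h
    have : arr = [] := List.eq_nil_of_length_eq_zero (Nat.le_zero.mp h)
    subst this; rw [elementoccurktimes_alt]; rfl
  | succ n ih =>
    intro arr h
    match arr with
    | [] => rw [elementoccurktimes_alt]; rfl
    | x :: t =>
      rw [elementoccurktimes_alt]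
      simp only [PySem.List.count_eq]
      have hfc : (x :: t).filter (fun y => !(y == x)) = t.filter (fun y => !(y == x)) := by
        rw [List.filter_cons]; simp
      by_cases hk : ((((x :: t).count x : Nat) : Int) == k) = true
      · rw [if_pos hk, pvFirst_cons, hk]
        simp
      · rw [if_neg hk]
        have hlen : ((x :: t).filter (fun y => !(y == x))).length ≤ n := by
          rw [hfc]
          exact Nat.le_trans (List.length_filter_le _ _) (by simpa using h)
        rw [ih _ hlen, hfc]
        have hx : (((x :: t).count x : Nat) : Int) ≠ k := by simpa using hk
        rw [pvFirst_cons, if_neg hk]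
        exact (pvFirst_strip x t k hx t).symm

lemma B_eq_pvFirst (arr : List Int) (k : Int) :
    elementoccurktimes_alt arr k = pvFirst arr k arr :=
  B_eq_aux k arr.length arr (Nat.le_refl _)

-- ===== VERDICT (by name: the statement is the Claim_ definition above) =====
theorem elementoccurktimes_spec : Claim_equal_elementoccurktimes := by
  intro arr k _
  show elementoccurktimes arr k = elementoccurktimes_alt arr k
  rw [A_eq_pvFirst, B_eq_pvFirst]
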